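-- pv_equiv track=rewrite | github.com/shubhamdhingra38/A2OJ-Ladders | Python/phoenixbeauty.py | is_beautiful
-- ===== SOURCE A (Python) =====
-- def is_beautiful(arr, k):
--     flag = True
--     s = sum(arr[:k])
--     for i in range(len(arr)-k+1):
--         temp = 0
--         for j in range(k):
--             temp += arr[i+j]
--         if temp != s:
--             flag = False
--             break
--     return flag
-- ===== SOURCE B (Python) =====
-- def is_beautiful(arr, k):
--     if k < 0:
--         return True  # no windows of negative length exist
--     s = sum(arr[:k])
--     w = s
--     for i in range(k, len(arr)):
--         w += arr[i] - arr[i - k]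
--         if w != s:
--             return False
--     return True
-- ===== Notes on version B (the rewrite author's own statement) =====
-- stated objective: faster
-- what changed: Replaced the O(n*k) recomputation of every window sum from scratch by an O(n) sliding window that updates one running sum by adding the entering and subtracting the leaving element.
-- intended difference: For k < 0 with a nonzero sum of arr[:k], A returns False (an artefact: its seed s sums the truncated prefix arr[:k] while its inner loop is empty, so it compares 0 to that prefix sum), whereas B returns True, the intended vacuous answer since no windows of negative length exist. — e.g. on is_beautiful([1, 0], -1): A returns false, B returns true
import Mathlib
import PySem

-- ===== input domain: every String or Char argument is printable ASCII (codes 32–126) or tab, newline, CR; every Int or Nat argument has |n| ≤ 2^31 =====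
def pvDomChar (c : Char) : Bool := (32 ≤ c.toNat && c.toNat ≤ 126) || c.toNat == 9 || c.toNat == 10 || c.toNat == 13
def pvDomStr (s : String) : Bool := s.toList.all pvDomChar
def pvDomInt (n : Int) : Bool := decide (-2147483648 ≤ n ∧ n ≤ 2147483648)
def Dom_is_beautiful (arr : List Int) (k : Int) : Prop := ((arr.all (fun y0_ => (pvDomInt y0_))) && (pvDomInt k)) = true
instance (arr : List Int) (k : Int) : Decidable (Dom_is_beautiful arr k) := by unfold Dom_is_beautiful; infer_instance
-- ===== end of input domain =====

-- B replaces A's per-window recomputation by a sliding window (running sum updated per shift);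
-- for k < 0 B returns the vacuous True where A's value is an artefact (see D_ below).

-- ===== PORT A =====
-- temp = 0; for j in range(k): temp += arr[i+j]
def isbWindow (arr : List Int) (k : Int) (i : Int) : Int :=
  (PySem.List.pyRange 0 k 1).foldl (fun temp j => temp + PySem.List.pyGetD arr (i + j) 0) 0

-- the outer for-loop with flag/break: stops with False at the first window ≠ s
def isbLoopA (arr : List Int) (k s : Int) : List Int → Bool
  | [] => true
  | i :: rest => if isbWindow arr k i ≠ s then false else isbLoopA arr k s rest

def is_beautiful (arr : List Int) (k : Int) : Bool :=
  let s := (PySem.List.slice arr none (some k)).sum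
  isbLoopA arr k s (PySem.List.pyRange 0 ((arr.length : Int) - k + 1) 1)

-- ===== PORT B =====
-- for i in range(k, len(arr)): w += arr[i] - arr[i-k]; if w != s: return False
def isbLoopB (arr : List Int) (k s : Int) : Int → List Int → Bool
  | _, [] => true
  | w, i :: rest =>
      let w' := w + PySem.List.pyGetD arr i 0 - PySem.List.pyGetD arr (i - k) 0
      if w' ≠ s then false else isbLoopB arr k s w' rest

def is_beautiful_alt (arr : List Int) (k : Int) : Bool :=
  if k < 0 then true
  else
    let s := (PySem.List.slice arr none (some k)).sum
    isbLoopB arr k s s (PySem.List.pyRange k (arr.length : Int) 1)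

-- ===== PRECONDITION & SPEC =====
-- For k < 0 with sum(arr[:k]) ≠ 0, A returns False (artefact: its seed sums the truncated
-- prefix while its inner loop is empty), B returns True, the intended vacuous answer since
-- no windows of negative length exist.
def D_is_beautiful (arr : List Int) (k : Int) : Prop :=
  k < 0 ∧ (arr.take ((arr.length : Int) + k).toNat).sum ≠ 0
instance (arr : List Int) (k : Int) : Decidable (D_is_beautiful arr k) := by
  unfold D_is_beautiful; infer_instance

def Spec_is_beautiful (arr : List Int) (k : Int) (out : Bool) : Prop :=
  ¬ D_is_beautiful arr k → out = is_beautiful_alt arr k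
instance (arr : List Int) (k : Int) (out : Bool) : Decidable (Spec_is_beautiful arr k out) := by
  unfold Spec_is_beautiful; infer_instance

def pvDiffWitness_is_beautiful : List Int × Int := ([1, 0], -1)
def pvDiffWitnessOut_is_beautiful : Bool × Bool := (false, true)

-- ===== CLAIM =====
def Claim_unchanged_is_beautiful : Prop := ∀ (arr : List Int) (k : Int), Dom_is_beautiful arr k → Spec_is_beautiful arr k (is_beautiful arr k)
def Claim_changed_is_beautiful : Prop := Dom_is_beautiful (pvDiffWitness_is_beautiful.1) (pvDiffWitness_is_beautiful.2) ∧ D_is_beautiful (pvDiffWitness_is_beautiful.1) (pvDiffWitness_is_beautiful.2) ∧ is_beautiful (pvDiffWitness_is_beautiful.1) (pvDiffWitness_is_beautiful.2) = pvDiffWitnessOut_is_beautiful.1 ∧ is_beautiful_alt (pvDiffWitness_is_beautiful.1) (pvDiffWitness_is_beautiful.2) = pvDiffWitnessOut_is_beautiful.2 ∧ pvDiffWitnessOut_is_beautiful.1 ≠ pvDiffWitnessOut_is_beautiful.2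
def Claim_exact_is_beautiful : Prop := ∀ (arr : List Int) (k : Int), Dom_is_beautiful arr k → D_is_beautiful arr k → is_beautiful arr k ≠ is_beautiful_alt arr k

-- ===== LEMMAS AND PROOFS =====

-- the window sum starting at position t (as an Int index), of length k
def isbW (arr : List Int) (k : Int) (t : Int) : Int :=
  ((arr.drop t.toNat).take k.toNat).sum

-- A's outer loop is an 'all' over its index list
lemma loopA_all (arr : List Int) (k s : Int) (l : List Int) :
    isbLoopA arr k s l = l.all (fun i => isbWindow arr k i == s) := by
  induction l with
  | nil => rfl
  | cons i rest ih =>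
      simp only [isbLoopA, List.all_cons, ih]
      by_cases h : isbWindow arr k i = s <;> simp [h]

-- for k < 0 the truncated-prefix seed s = sum(arr[:k])
lemma slice_neg (arr : List Int) (k : Int) (hk : k < 0) :
    (PySem.List.slice arr none (some k)).sum
      = (arr.take ((arr.length : Int) + k).toNat).sum := by
  obtain ⟨m, hm0, rfl⟩ : ∃ m : Nat, 0 < m ∧ k = -(m : Int) :=
    ⟨(-k).toNat, by omega, by omega⟩
  rw [PySem.List.slice_to_neg_natCast arr m hm0,
    show ((arr.length : Int) + -(m : Int)).toNat = arr.length - m by omega]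

-- A's inner loop is empty for k ≤ 0, so every window value is 0
lemma window_nonpos (arr : List Int) (k i : Int) (hk : k ≤ 0) :
    isbWindow arr k i = 0 := by
  unfold isbWindow
  rw [PySem.List.pyRange_one_eq_nil (by omega)]
  rfl

-- A's inner loop folds the indexed elements: helper over a Nat bound
lemma fold_window (arr : List Int) (i : Int) (hi : 0 ≤ i) :
    ∀ m : Nat, i + (m : Int) ≤ (arr.length : Int) →
      ((PySem.List.pyRange 0 (m : Int) 1).foldl
          (fun temp j => temp + PySem.List.pyGetD arr (i + j) 0) 0)
        = ((arr.drop i.toNat).take m).sum := by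
  intro m
  induction m with
  | zero => intro _; rw [PySem.List.pyRange_one_eq_nil (by omega)]; simp
  | succ m ih =>
      intro hm
      have hcast : ((m + 1 : Nat) : Int) = (m : Int) + 1 := by push_cast; ring
      rw [hcast, PySem.List.pyRange_one_succ_right (by omega), List.foldl_append,
        ih (by omega)]
      have hgm : i.toNat + m < arr.length := by omega
      have hget : PySem.List.pyGetD arr (i + (m : Int)) 0 = arr[i.toNat + m] := by
        rw [PySem.List.pyGetD_eq_getElem arr 0 (by omega) (by omega)]
        congr 1
        omega
      have htake : (arr.drop i.toNat).take (m + 1)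
          = (arr.drop i.toNat).take m ++ [arr[i.toNat + m]] := by
        rw [List.take_add_one]
        congr 1
        rw [List.getElem?_drop]
        simp [List.getElem?_eq_getElem hgm]
      simp only [List.foldl_cons, List.foldl_nil, hget, htake, List.sum_append,
        List.sum_cons, List.sum_nil]
      ring

-- A's inner loop computes the window sum when the window fits
lemma window_eq (arr : List Int) (k i : Int) (hk : 0 ≤ k) (hi : 0 ≤ i)
    (hin : i + k ≤ (arr.length : Int)) :
    isbWindow arr k i = isbW arr k i := by
  unfold isbWindow isbW
  have hfold := fold_window arr i hi k.toNat (by omega)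
  rw [show ((k.toNat : Nat) : Int) = k by omega] at hfold
  rw [hfold]

-- sliding-window recurrence: shift the window one step right
lemma isbW_step (arr : List Int) (k t : Int) (h0 : 0 ≤ t) (hk : 1 ≤ k)
    (hin : t + k < (arr.length : Int)) :
    isbW arr k (t + 1)
      = isbW arr k t + PySem.List.pyGetD arr (t + k) 0 - PySem.List.pyGetD arr t 0 := by
  unfold isbW
  have htn : t.toNat < arr.length := by omega
  obtain ⟨m, hm⟩ : ∃ m : Nat, k.toNat = m + 1 := ⟨k.toNat - 1, by omega⟩
  have hdrop : arr.drop t.toNat = arr[t.toNat] :: arr.drop (t.toNat + 1) := by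
    rw [List.drop_eq_getElem_cons htn]
  have hidx : t.toNat + 1 + m < arr.length := by omega
  have h1 : (arr.drop (t.toNat + 1)).take (m + 1)
      = (arr.drop (t.toNat + 1)).take m ++ [arr[t.toNat + 1 + m]] := by
    rw [List.take_add_one]
    congr 1
    rw [List.getElem?_drop]
    simp [List.getElem?_eq_getElem hidx]
  have e1 : (t + 1).toNat = t.toNat + 1 := by omega
  have e2 : PySem.List.pyGetD arr (t + k) 0 = arr[t.toNat + 1 + m] := by
    rw [PySem.List.pyGetD_eq_getElem arr 0 (by omega) (by omega)]
    congr 1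
    omega
  have e3 : PySem.List.pyGetD arr t 0 = arr[t.toNat] := by
    rw [PySem.List.pyGetD_eq_getElem arr 0 h0 (by omega)]
  rw [e1, hm, h1, hdrop, e2, e3]
  simp only [List.take_succ_cons, List.sum_cons, List.sum_append, List.sum_nil]
  ring

-- B's loop, started on the window sum ending just before position a, is an 'all'
-- over the shifted windows
lemma loopB_all (arr : List Int) (k s : Int) (hk : 1 ≤ k) :
    ∀ (c : Nat) (a : Int), k ≤ a → a + (c : Int) = (arr.length : Int) →
      isbLoopB arr k s (isbW arr k (a - k)) (PySem.List.pyRange a (arr.length : Int) 1)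
        = (PySem.List.pyRange a (arr.length : Int) 1).all
            (fun i => isbW arr k (i - k + 1) == s) := by
  intro c
  induction c with
  | zero =>
      intro a ha hc
      rw [PySem.List.pyRange_one_eq_nil (by omega)]
      rfl
  | succ m ih =>
      intro a ha hc
      rw [PySem.List.pyRange_one_cons (by omega)]
      simp only [isbLoopB, List.all_cons]
      have hstep : isbW arr k (a - k) + PySem.List.pyGetD arr a 0
            - PySem.List.pyGetD arr (a - k) 0 = isbW arr k (a - k + 1) := by
        rw [isbW_step arr k (a - k) (by omega) hk (by omega)]
        ring_nf
      rw [hstep]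
      have ihh := ih (a + 1) (by omega) (by omega)
      rw [show a + 1 - k = a - k + 1 by ring] at ihh
      by_cases h : isbW arr k (a - k + 1) = s
      · rw [if_neg (not_not_intro h), ihh]
        simp [h]
      · rw [if_pos h]
        simp [h]

-- main case k ≥ 1, window fits: both sides are the same 'all'
lemma main_pos (arr : List Int) (k : Int) (hk : 1 ≤ k) :
    is_beautiful arr k = is_beautiful_alt arr k := by
  unfold is_beautiful is_beautiful_alt
  rw [if_neg (by omega)]
  by_cases hbig : (arr.length : Int) < k
  · rw [PySem.List.pyRange_one_eq_nil (a := 0) (by omega),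
        PySem.List.pyRange_one_eq_nil (a := k) (by omega)]
    rfl
  · have hs : (PySem.List.slice arr none (some k)).sum = isbW arr k 0 := by
      rw [PySem.List.slice_to arr (by omega : (0 : Int) ≤ k)]
      unfold isbW
      simp
    rw [loopA_all, hs]
    have hB := loopB_all arr k (isbW arr k 0) hk ((arr.length : Int) - k).toNat k
      (le_refl k) (by omega)
    rw [show k - k = (0 : Int) by ring] at hB
    rw [hB]
    rw [PySem.List.pyRange_one_cons (a := 0) (b := (arr.length : Int) - k + 1) (by omega)]
    simp only [List.all_cons]
    have hw0 : (isbWindow arr k 0 == isbW arr k 0) = true := by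
      simp [window_eq arr k 0 (by omega) (le_refl 0) (by omega)]
    rw [hw0, Bool.true_and]
    rw [Bool.eq_iff_iff]
    simp only [List.all_eq_true, PySem.List.mem_pyRange_one]
    constructor
    · intro h i hi
      have := h (i - k + 1) ⟨by omega, by omega⟩
      have hw : isbWindow arr k (i - k + 1) = isbW arr k (i - k + 1) :=
        window_eq arr k (i - k + 1) (by omega) (by omega) (by omega)
      rwa [hw] at this
    · intro h j hj
      have := h (j + k - 1) ⟨by omega, by omega⟩
      rw [show j + k - 1 - k + 1 = j by ring] at this
      have hw : isbWindow arr k j = isbW arr k j :=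
        window_eq arr k j (by omega) (by omega) (by omega)
      rwa [hw]

-- k = 0: A's every window is the empty sum 0 = s; B's running sum never changes
lemma main_zero (arr : List Int) :
    is_beautiful arr 0 = is_beautiful_alt arr 0 := by
  unfold is_beautiful is_beautiful_alt
  rw [if_neg (by omega)]
  have hs : (PySem.List.slice arr none (some (0 : Int))).sum = 0 := by
    rw [PySem.List.slice_to arr (le_refl (0 : Int))]
    simp
  rw [hs, loopA_all]
  have hA : ∀ l : List Int,
      l.all (fun i => isbWindow arr 0 i == (0 : Int)) = true := by
    intro l
    simp only [List.all_eq_true]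
    intro i _
    rw [window_nonpos arr 0 i (by omega)]
    rfl
  rw [hA]
  have hB : ∀ l : List Int, isbLoopB arr 0 0 0 l = true := by
    intro l
    induction l with
    | nil => rfl
    | cons i rest ih =>
        simp only [isbLoopB, sub_zero]
        rw [show (0 : Int) + PySem.List.pyGetD arr i 0 - PySem.List.pyGetD arr i 0
            = 0 by ring]
        simpa using ih
  rw [hB]

-- k < 0 outside D: the seed is 0, every (empty) window is 0, A returns True like B
lemma main_neg (arr : List Int) (k : Int) (hk : k < 0)
    (h0 : (arr.take ((arr.length : Int) + k).toNat).sum = 0) :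
    is_beautiful arr k = is_beautiful_alt arr k := by
  unfold is_beautiful is_beautiful_alt
  rw [if_pos hk, slice_neg arr k hk, h0, loopA_all]
  simp only [List.all_eq_true]
  intro i _
  rw [window_nonpos arr k i (by omega)]
  rfl

-- ===== VERDICT =====
theorem is_beautiful_spec : Claim_unchanged_is_beautiful := by
  intro arr k _
  unfold Spec_is_beautiful
  intro hD
  rcases lt_trichotomy k 0 with hneg | hzero | hpos
  · have h0 : (arr.take ((arr.length : Int) + k).toNat).sum = 0 := by
      by_contra h
      exact hD ⟨hneg, h⟩
    exact main_neg arr k hneg h0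
  · subst hzero; exact main_zero arr
  · exact main_pos arr k (by omega)

theorem is_beautiful_changed : Claim_changed_is_beautiful := by
  unfold Claim_changed_is_beautiful; decide

theorem is_beautiful_tight : Claim_exact_is_beautiful := by
  intro arr k _ hD
  obtain ⟨hk, hs⟩ := hD
  have hB : is_beautiful_alt arr k = true := by
    unfold is_beautiful_alt
    rw [if_pos hk]
  have hA : is_beautiful arr k = false := by
    unfold is_beautiful
    rw [slice_neg arr k hk, loopA_all,
        PySem.List.pyRange_one_cons (a := 0) (by omega)]
    simp only [List.all_cons, window_nonpos arr k 0 (by omega)]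
    have : ((0 : Int) == (arr.take ((arr.length : Int) + k).toNat).sum) = false := by
      simpa using fun h => hs h.symm
    rw [this]
    rfl
  rw [hA, hB]
  simp
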